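-- pv_equiv track=rewrite | github.com/miliar/Code_Jam_Webscraper | solutions_python/Problem_155/2402.py | count_friends
-- ===== SOURCE A (Python) =====
-- def count_friends(smax, peeps):
-- 	standing = 0
-- 	friends = 0
-- 	for j in range(len(peeps)):
-- 		p = int(peeps[j])
-- 		while standing < j:
-- 			friends += 1
-- 			standing += 1
-- 		standing += p
-- 	return friends
-- ===== SOURCE B (Python) =====
-- def count_friends(smax, peeps):
--     total = 0
--     friends = 0
--     for j, s in enumerate(peeps):
--         friends = max(friends, j - total)
--         total += int(s)
--     return friends
-- ===== Notes on version B (the rewrite author's own statement) =====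
-- stated objective: simpler
-- what changed: Replaced A's inner while loop that bumps a combined 'standing' counter one step at a time with a single pass keeping a plain prefix sum and taking the maximum deficit max(friends, j - total).
import Mathlib
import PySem

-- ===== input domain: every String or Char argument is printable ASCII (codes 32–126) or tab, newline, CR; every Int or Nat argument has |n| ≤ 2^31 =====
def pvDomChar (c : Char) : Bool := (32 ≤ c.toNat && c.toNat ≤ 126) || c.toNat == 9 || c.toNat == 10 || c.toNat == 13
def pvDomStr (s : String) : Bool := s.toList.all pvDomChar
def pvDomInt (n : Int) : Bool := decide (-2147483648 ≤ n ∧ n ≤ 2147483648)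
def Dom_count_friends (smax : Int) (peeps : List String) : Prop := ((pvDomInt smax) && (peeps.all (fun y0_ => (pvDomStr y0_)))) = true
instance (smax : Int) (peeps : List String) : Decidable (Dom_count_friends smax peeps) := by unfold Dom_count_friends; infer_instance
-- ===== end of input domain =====

-- B replaces A's step-by-step inner while loop (bumping a combined 'standing' counter)
-- with a single pass keeping a raw prefix sum and the maximum deficit; objective: simpler.


-- ===== PORT A =====
-- the inner 'while standing < j: friends += 1; standing += 1'
def pvWhileA (j standing friends : Int) : Int × Int :=
  if standing < j then pvWhileA j (standing + 1) (friends + 1) else (standing, friends)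
termination_by (j - standing).toNat
decreasing_by omega

-- the for loop over range(len(peeps)); 'none' = int() raised (outside Pre_)
def pvGoA : List String → Int → Int → Int → Int
  | [], _, _, friends => friends
  | s :: rest, j, standing, friends =>
    match PySem.Int.ofStr? s with
    | none => friends
    | some p =>
      let r := pvWhileA j standing friends
      pvGoA rest (j + 1) (r.1 + p) r.2

def count_friends (smax : Int) (peeps : List String) : Int :=
  pvGoA peeps 0 0 0

-- ===== PORT B =====
def pvGoB : List String → Int → Int → Int → Int
  | [], _, _, friends => friends
  | s :: rest, j, total, friends =>
    let friends' := max friends (j - total)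
    match PySem.Int.ofStr? s with
    | none => friends'
    | some p => pvGoB rest (j + 1) (total + p) friends'

def count_friends_alt (smax : Int) (peeps : List String) : Int :=
  pvGoB peeps 0 0 0

-- ===== PRECONDITION & SPEC =====
-- Pre_: every element parses as a Python int; otherwise both A and B raise ValueError.
def Pre_count_friends (smax : Int) (peeps : List String) : Prop :=
  (peeps.all (fun s => (PySem.Int.ofStr? s).isSome)) = true
instance (smax : Int) (peeps : List String) : Decidable (Pre_count_friends smax peeps) := by
  unfold Pre_count_friends; infer_instance

def pvWitness_count_friends : Int × List String := (3, ["1", "0", "2"])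

def Spec_count_friends (smax : Int) (peeps : List String) (out : Int) : Prop := out = count_friends_alt smax peeps
instance (smax : Int) (peeps : List String) (out : Int) : Decidable (Spec_count_friends smax peeps out) := by unfold Spec_count_friends; infer_instance

-- ===== CLAIM (what is proved, stated in full; the proofs are below) =====
def Claim_equal_count_friends : Prop := ∀ (smax : Int) (peeps : List String), Dom_count_friends smax peeps → Pre_count_friends smax peeps → Spec_count_friends smax peeps (count_friends smax peeps)

-- ===== LEMMAS AND PROOFS =====
theorem pvWhileA_eq (j standing friends : Int) :
    pvWhileA j standing friends = (max standing j, friends + max 0 (j - standing)) := by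
  by_cases h : standing < j
  · rw [pvWhileA, if_pos h, pvWhileA_eq]
    simp only [Prod.mk.injEq]
    exact ⟨by omega, by omega⟩
  · rw [pvWhileA, if_neg h]
    simp only [Prod.mk.injEq]
    exact ⟨by omega, by omega⟩
termination_by (j - standing).toNat
decreasing_by omega

theorem pvGo_eq (l : List String) (j t f : Int)
    (h : ∀ s ∈ l, (PySem.Int.ofStr? s).isSome) :
    pvGoA l j (t + f) f = pvGoB l j t f := by
  induction l generalizing j t f with
  | nil => rfl
  | cons s rest ih =>
    have hs := h s (List.mem_cons_self ..)
    obtain ⟨p, hp⟩ := Option.isSome_iff_exists.mp hs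
    simp only [pvGoA, pvGoB, hp, pvWhileA_eq]
    have h1 : max (t + f) j + p = (t + p) + max f (j - t) := by omega
    have h2 : f + max 0 (j - (t + f)) = max f (j - t) := by omega
    rw [h1, h2, ih _ _ _ (fun s hs => h s (List.mem_cons_of_mem _ hs))]

-- ===== VERDICT (by name: the statement is the Claim_ definition above) =====
theorem count_friends_spec : Claim_equal_count_friends := by
  intro smax peeps _ hpre
  unfold Spec_count_friends count_friends count_friends_alt
  have h := pvGo_eq peeps 0 0 0 (fun s hs => List.all_eq_true.mp hpre s hs)
  simpa using h
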